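-- pv_equiv track=rewrite | github.com/stochastic-sisyphus/text-feature-span-extractor | src/invoices/normalize.py | _extract_digit_groups
-- ===== SOURCE A (Python) =====
-- def _extract_digit_groups(text: str) -> list[str]:
--     """Extract groups of consecutive digits from text."""
--     groups: list[str] = []
--     current: list[str] = []
--     for c in text:
--         if c.isdigit():
--             current.append(c)
--         else:
--             if current:
--                 groups.append("".join(current))
--                 current = []
--     if current:
--         groups.append("".join(current))
--     return groups
-- ===== SOURCE B (Python) =====
-- def _extract_digit_groups(text: str) -> list[str]:
--     """Extract groups of consecutive digits from text."""
--     return "".join(c if c.isdigit() else " " for c in text).split()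
-- ===== Notes on version B (the rewrite author's own statement) =====
-- stated objective: idiomatic
-- what changed: Replaces the explicit accumulator loop (groups/current lists with flush-on-boundary logic) by a transform-then-split: map each non-digit char to a space in one join, then let str.split() deliver the digit runs.
import Mathlib
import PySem

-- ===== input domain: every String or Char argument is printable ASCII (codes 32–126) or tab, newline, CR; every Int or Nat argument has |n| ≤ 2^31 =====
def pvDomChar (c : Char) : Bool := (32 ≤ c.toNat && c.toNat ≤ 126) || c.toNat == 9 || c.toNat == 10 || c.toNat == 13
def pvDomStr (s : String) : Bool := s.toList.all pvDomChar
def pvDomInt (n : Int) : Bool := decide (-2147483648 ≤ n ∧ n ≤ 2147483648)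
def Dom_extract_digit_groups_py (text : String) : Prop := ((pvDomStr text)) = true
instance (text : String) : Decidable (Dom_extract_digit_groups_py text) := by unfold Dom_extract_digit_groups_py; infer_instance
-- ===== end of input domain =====

-- B replaces A's explicit accumulator loop by a transform-then-split: map each
-- non-digit character to a space, then split the result on whitespace (idiomatic).


-- ===== PORT A =====
-- loop body: on a digit extend `current`; otherwise flush a nonempty `current` into `groups`
def pvAStep (st : List String × List Char) (c : Char) : List String × List Char :=
  if PySem.Chars.isdigit c then (st.1, st.2 ++ [c])
  else if st.2 = [] then st
  else (st.1 ++ [String.ofList st.2], [])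

def extract_digit_groups_py (text : String) : List String :=
  let st := text.toList.foldl pvAStep ([], [])
  if st.2 = [] then st.1 else st.1 ++ [String.ofList st.2]

-- ===== PORT B =====
def extract_digit_groups_py_alt (text : String) : List String :=
  PySem.Str.split₀
    (String.ofList (text.toList.map (fun c => if PySem.Chars.isdigit c then c else ' ')))

-- ===== PRECONDITION & SPEC =====
def Spec_extract_digit_groups_py (text : String) (out : List String) : Prop := out = extract_digit_groups_py_alt text
instance (text : String) (out : List String) : Decidable (Spec_extract_digit_groups_py text out) := by unfold Spec_extract_digit_groups_py; infer_instance

-- ===== CLAIM (what is proved, stated in full; the proofs are below) =====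
def Claim_equal_extract_digit_groups_py : Prop := ∀ (text : String), Dom_extract_digit_groups_py text → Spec_extract_digit_groups_py text (extract_digit_groups_py text)

-- ===== LEMMAS AND PROOFS =====

lemma pv_go_nil (cur : List Char) (acc : List (List Char)) :
    PySem.Chars.split₀.go [] cur acc
    = if cur.isEmpty = true then acc.reverse else (cur.reverse :: acc).reverse := rfl

lemma pv_go_cons (c : Char) (rest cur : List Char) (acc : List (List Char)) :
    PySem.Chars.split₀.go (c :: rest) cur acc
    = if PySem.Chars.isspace c = true then
        (if cur.isEmpty = true then PySem.Chars.split₀.go rest [] acc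
         else PySem.Chars.split₀.go rest [] (cur.reverse :: acc))
      else PySem.Chars.split₀.go rest (c :: cur) acc := rfl

lemma pv_isspace_of_isdigit {c : Char} (h : PySem.Chars.isdigit c = true) :
    PySem.Chars.isspace c = false := by
  have h1 : 48 ≤ c.toNat ∧ c.toNat ≤ 57 := by
    simp only [PySem.Chars.isdigit, Bool.and_eq_true, decide_eq_true_eq, Char.le_def,
      UInt32.le_iff_toNat_le] at h
    exact h
  unfold PySem.Chars.isspace
  simp only [Bool.or_eq_false_iff, Bool.and_eq_false_iff, decide_eq_false_iff_not]
  omega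

lemma pv_go_acc (cs cur : List Char) (acc : List (List Char)) :
    PySem.Chars.split₀.go cs cur acc = acc.reverse ++ PySem.Chars.split₀.go cs cur [] := by
  induction cs generalizing cur acc with
  | nil =>
    by_cases h : cur.isEmpty <;> simp [pv_go_nil, h]
  | cons c rest ih =>
    by_cases hs : PySem.Chars.isspace c
    · by_cases h : cur.isEmpty
      · simp only [pv_go_cons, hs, h, if_true]
        exact ih [] acc
      · simp only [pv_go_cons, hs, if_true, h]
        rw [ih [] (cur.reverse :: acc), ih [] [cur.reverse]]
        simp
    · simp only [pv_go_cons, if_neg hs]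
      exact ih (c :: cur) acc

lemma pv_key (cs : List Char) (groups : List String) (cur : List Char) :
    (if (cs.foldl pvAStep (groups, cur)).2 = [] then (cs.foldl pvAStep (groups, cur)).1
      else (cs.foldl pvAStep (groups, cur)).1 ++ [String.ofList (cs.foldl pvAStep (groups, cur)).2])
    = groups ++
      (PySem.Chars.split₀.go
        (cs.map (fun c => if PySem.Chars.isdigit c then c else ' '))
        cur.reverse []).map String.ofList := by
  induction cs generalizing groups cur with
  | nil =>
    by_cases h : cur = [] <;>
      simp [pv_go_nil, List.isEmpty_iff, h]
  | cons c rest ih =>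
    by_cases hd : PySem.Chars.isdigit c
    · have hns := pv_isspace_of_isdigit hd
      simp only [List.foldl_cons, List.map_cons, pvAStep, if_pos hd, pv_go_cons, hns,
        Bool.false_eq_true, if_false]
      have hrev : c :: cur.reverse = (cur ++ [c]).reverse := by simp
      rw [hrev]
      exact ih groups (cur ++ [c])
    · have hsp : PySem.Chars.isspace ' ' = true := by decide
      by_cases h : cur = []
      · subst h
        simp only [List.foldl_cons, List.map_cons, pvAStep, if_neg hd, pv_go_cons,
          List.reverse_nil, List.isEmpty_nil, hsp, if_true]
        exact ih groups []
      · have hne : cur.reverse.isEmpty = false := by simp [h]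
        simp only [List.foldl_cons, List.map_cons, pvAStep, if_neg hd, if_neg h, pv_go_cons,
          hsp, if_true, hne, Bool.false_eq_true, if_false, List.reverse_reverse]
        rw [pv_go_acc _ [] [cur]]
        have hih := ih (groups ++ [String.ofList cur]) []
        simp only [List.reverse_nil] at hih
        rw [hih]
        simp

-- ===== VERDICT (by name: the statement is the Claim_ definition above) =====
theorem extract_digit_groups_py_spec : Claim_equal_extract_digit_groups_py := by
  intro text _
  unfold Spec_extract_digit_groups_py extract_digit_groups_py extract_digit_groups_py_alt
  rw [show PySem.Str.split₀ = fun s => (PySem.Chars.split₀ s.toList).map String.ofList from rfl]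
  simp only [PySem.Chars.split₀]
  have := pv_key text.toList [] []
  simpa using this
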